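-- pv_equiv track=rewrite | github.com/DenisAlaime/Chauffage_Henallux_Virton | generateur_horaire.py | build_xml
-- ===== SOURCE A (Python) =====
-- from typing import Optional, List, Dict, Any
--
-- def build_xml(events_by_date: Dict[str, list]) -> str:
--     """Sérialise le XML, <tNBEvent> sur une seule ligne, sauts de ligne entre nœuds."""
--     from xml.etree import ElementTree as ET
--     root = ET.Element("dataentry")
--     for idx, (date_key, evts) in enumerate(sorted(events_by_date.items())):
--         day = ET.SubElement(root, 'MAIN.DayOfWeek', attrib={"index": str(idx)})
--         ddate = ET.SubElement(day, "dDate"); ddate.text = date_key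
--         for i, e in enumerate(evts):
--             t = ET.SubElement(day, "tNBEvent", attrib={"index": str(i)})
--             ET.SubElement(t, "LOCATION").text  = e.get("LOCATION", "")
--             ET.SubElement(t, "TimeSTART").text = e.get("TimeSTART", "")
--             ET.SubElement(t, "TimeEND").text   = e.get("TimeEND", "")
--             ET.SubElement(t, "SUMMARY").text   = e.get("SUMMARY", "")
--     # Construction manuelle
--     lines = ["<dataentry>"]
--     for day in root:
--         lines.append(f'<MAIN.DayOfWeek index="{day.attrib.get("index","0")}">')
--         # dDate
--         for c in day:
--             if c.tag == "dDate":
--                 lines.append(f'<dDate>{c.text or ""}</dDate>')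
--                 break
--         # événements (une seule ligne chacun)
--         for child in day:
--             if child.tag != "tNBEvent":
--                 continue
--             parts = []
--             for sub in child:
--                 text = "" if sub.text is None else sub.text
--                 parts.append(f'<{sub.tag}>{text}</{sub.tag}>')
--             inner = "".join(parts)
--             idx_attr = child.attrib.get("index", "0")
--             lines.append(f'<tNBEvent index="{idx_attr}">{inner}</tNBEvent>')
--         lines.append("</MAIN.DayOfWeek>")
--     lines.append("</dataentry>")
--     return "\n".join(lines) + "\n"
-- ===== SOURCE B (Python) =====
-- def build_xml(events_by_date):
--     """One pass over the sorted items, emitting lines directly (no ElementTree)."""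
--     TAGS = ("LOCATION", "TimeSTART", "TimeEND", "SUMMARY")
--
--     def day_lines(idx, date_key, evts):
--         return ([f'<MAIN.DayOfWeek index="{idx}">', f'<dDate>{date_key}</dDate>']
--                 + [f'''<tNBEvent index="{i}">{"".join(f"<{t}>{e.get(t, '')}</{t}>" for t in TAGS)}</tNBEvent>'''
--                    for i, e in enumerate(evts)]
--                 + ['</MAIN.DayOfWeek>'])
--
--     lines = (["<dataentry>"]
--              + [ln for idx, item in enumerate(sorted(events_by_date.items()))
--                 for ln in day_lines(idx, item[0], item[1])]
--              + ["</dataentry>"])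
--     return "\n".join(lines) + "\n"
-- ===== Notes on version B (the rewrite author's own statement) =====
-- stated objective: simpler
-- what changed: Drops A's intermediate ElementTree (build-the-tree pass plus a second pass that re-walks it filtering children by tag) and instead emits the output lines directly in one pass over enumerate(sorted(events_by_date.items())).
import Mathlib
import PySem

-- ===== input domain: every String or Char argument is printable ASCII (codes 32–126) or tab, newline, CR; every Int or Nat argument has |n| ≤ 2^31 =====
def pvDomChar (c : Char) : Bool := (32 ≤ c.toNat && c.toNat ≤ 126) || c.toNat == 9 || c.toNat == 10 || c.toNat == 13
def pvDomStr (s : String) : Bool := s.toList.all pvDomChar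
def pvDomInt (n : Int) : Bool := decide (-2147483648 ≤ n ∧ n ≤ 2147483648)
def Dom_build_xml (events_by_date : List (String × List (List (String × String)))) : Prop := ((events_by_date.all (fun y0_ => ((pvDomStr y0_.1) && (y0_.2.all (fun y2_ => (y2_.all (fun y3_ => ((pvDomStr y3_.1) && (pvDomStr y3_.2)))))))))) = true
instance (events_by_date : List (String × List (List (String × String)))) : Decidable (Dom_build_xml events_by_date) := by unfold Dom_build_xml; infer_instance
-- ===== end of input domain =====

-- B drops A's intermediate ElementTree and its tag-filtering second pass: one pass over the
-- sorted items emits the lines directly (objective: simpler). Return value only; no side effects.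
-- Both Python functions receive DICTS: the association-list arguments are read with Python-dict
-- semantics (PySem.Dict.ofList: a later duplicate key overwrites, keeping the first position).

-- ===== PORT A =====
-- the tree A builds: a day holds its "index" attribute and its children;
-- a child is either the <dDate> element (its text) or a <tNBEvent> element
-- (its "index" attribute and its (tag, text) sub-elements)
inductive PvChild
  | ddate : String → PvChild
  | tnb : String → List (String × String) → PvChild
deriving DecidableEq, Repr

structure PvDay where
  idxAttr : String
  children : List PvChild
deriving DecidableEq, Repr

-- ET.SubElement(t, tag).text = e.get(tag, "") for the four tags (inner for-loop body)
def pvBuildEvent (i : Int) (e : List (String × String)) : PvChild :=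
  PvChild.tnb (PySem.Int.toStr i)
    [("LOCATION", (PySem.Dict.ofList e).getD "LOCATION" ""),
     ("TimeSTART", (PySem.Dict.ofList e).getD "TimeSTART" ""),
     ("TimeEND", (PySem.Dict.ofList e).getD "TimeEND" ""),
     ("SUMMARY", (PySem.Dict.ofList e).getD "SUMMARY" "")]

-- one iteration of A's first loop: the day element with its dDate child and its event children
def pvBuildDay (idx : Int) (dk : String) (evts : List (List (String × String))) : PvDay :=
  { idxAttr := PySem.Int.toStr idx,
    children := PvChild.ddate dk ::
      (PySem.List.enumerate evts).map (fun p => pvBuildEvent p.1 p.2) }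

-- 'for c in day: if c.tag == "dDate": append; break' — first dDate child only
def pvFindDDate : List PvChild → List String
  | [] => []
  | PvChild.ddate t :: _ => ["<dDate>" ++ t ++ "</dDate>"]
  | PvChild.tnb _ _ :: rest => pvFindDDate rest

-- f'<tNBEvent index="{idx_attr}">{inner}</tNBEvent>' with inner = "".join(parts)
def pvEventLine (ia : String) (subs : List (String × String)) : String :=
  "<tNBEvent index=\"" ++ ia ++ "\">" ++
    PySem.Str.join "" (subs.map (fun p => "<" ++ p.1 ++ ">" ++ p.2 ++ "</" ++ p.1 ++ ">")) ++
    "</tNBEvent>"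

-- 'for child in day: if child.tag != "tNBEvent": continue; …'
def pvEventLines : List PvChild → List String
  | [] => []
  | PvChild.ddate _ :: rest => pvEventLines rest
  | PvChild.tnb ia subs :: rest => pvEventLine ia subs :: pvEventLines rest

-- the body of A's 'for day in root' serialization loop
def pvSerializeDay (d : PvDay) : List String :=
  ["<MAIN.DayOfWeek index=\"" ++ d.idxAttr ++ "\">"] ++
    pvFindDDate d.children ++ pvEventLines d.children ++ ["</MAIN.DayOfWeek>"]

def build_xml (events_by_date : List (String × List (List (String × String)))) : String :=
  -- phase 1: build the tree from enumerate(sorted(events_by_date.items()));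
  -- phase 2: 'Construction manuelle' — walk the tree appending lines
  PySem.Str.join "\n"
    (((PySem.List.enumerate
        (PySem.List.sorted (PySem.Dict.ofList events_by_date).items (fun p => p.1) false)).map
        (fun p => pvBuildDay p.1 p.2.1 p.2.2)).foldl
        (fun acc day => acc ++ pvSerializeDay day) ["<dataentry>"] ++ ["</dataentry>"]) ++ "\n"

-- ===== PORT B =====
def pvTags : List String := ["LOCATION", "TimeSTART", "TimeEND", "SUMMARY"]

def pvAltEventLine (i : Int) (e : List (String × String)) : String :=
  "<tNBEvent index=\"" ++ PySem.Int.toStr i ++ "\">" ++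
    PySem.Str.join "" (pvTags.map
      (fun t => "<" ++ t ++ ">" ++ (PySem.Dict.ofList e).getD t "" ++ "</" ++ t ++ ">")) ++
    "</tNBEvent>"

def pvAltDayLines (idx : Int) (dk : String) (evts : List (List (String × String))) : List String :=
  ("<MAIN.DayOfWeek index=\"" ++ PySem.Int.toStr idx ++ "\">") ::
  ("<dDate>" ++ dk ++ "</dDate>") ::
  ((PySem.List.enumerate evts).map (fun p => pvAltEventLine p.1 p.2) ++ ["</MAIN.DayOfWeek>"])

def build_xml_alt (events_by_date : List (String × List (List (String × String)))) : String :=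
  PySem.Str.join "\n"
    ("<dataentry>" ::
      ((PySem.List.enumerate
         (PySem.List.sorted (PySem.Dict.ofList events_by_date).items (fun p => p.1) false)).flatMap
         (fun p => pvAltDayLines p.1 p.2.1 p.2.2) ++ ["</dataentry>"])) ++ "\n"

-- ===== PRECONDITION & SPEC =====
def Spec_build_xml (events_by_date : List (String × List (List (String × String)))) (out : String) : Prop := out = build_xml_alt events_by_date
instance (events_by_date : List (String × List (List (String × String)))) (out : String) : Decidable (Spec_build_xml events_by_date out) := by unfold Spec_build_xml; infer_instance

-- ===== CLAIM (what is proved, stated in full; the proofs are below) =====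
def Claim_equal_build_xml : Prop := ∀ (events_by_date : List (String × List (List (String × String)))), Dom_build_xml events_by_date → Spec_build_xml events_by_date (build_xml events_by_date)

-- ===== LEMMAS AND PROOFS =====

-- A's per-event line equals B's per-event line
theorem pvEventLine_build (i : Int) (e : List (String × String)) :
    pvEventLine (PySem.Int.toStr i)
      [("LOCATION", (PySem.Dict.ofList e).getD "LOCATION" ""),
       ("TimeSTART", (PySem.Dict.ofList e).getD "TimeSTART" ""),
       ("TimeEND", (PySem.Dict.ofList e).getD "TimeEND" ""),
       ("SUMMARY", (PySem.Dict.ofList e).getD "SUMMARY" "")] = pvAltEventLine i e := by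
  simp [pvEventLine, pvAltEventLine, pvTags, List.map]

-- the event-children block of a built day serializes to B's event lines
theorem pvEventLines_map (l : List (Int × List (String × String))) :
    pvEventLines (l.map (fun p => pvBuildEvent p.1 p.2)) =
      l.map (fun p => pvAltEventLine p.1 p.2) := by
  induction l with
  | nil => rfl
  | cons hd tl ih =>
      simp only [List.map_cons, pvBuildEvent, pvEventLines, pvEventLine_build]
      exact congrArg (List.cons _) ih

-- serializing A's built day gives exactly B's day lines
theorem pvSerializeDay_build (idx : Int) (dk : String) (evts : List (List (String × String))) :
    pvSerializeDay (pvBuildDay idx dk evts) = pvAltDayLines idx dk evts := by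
  simp only [pvSerializeDay, pvBuildDay, pvFindDDate, pvEventLines, pvEventLines_map,
    pvAltDayLines]
  rfl

-- ===== VERDICT (by name: the statement is the Claim_ definition above) =====
theorem build_xml_spec : Claim_equal_build_xml := by
  intro ev _
  show build_xml ev = build_xml_alt ev
  unfold build_xml build_xml_alt
  rw [PySem.List.foldl_append_eq_flatMap, List.flatMap_map]
  simp only [pvSerializeDay_build]
  rfl
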